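-- pv_equiv track=rewrite | github.com/BosaBL/vertical-fragmentation | affinity.py | affinity
-- ===== SOURCE A (Python) =====
-- def affinity(use_matrix: list[int], freq_sum: list[int]) -> list[list[int]]:
--     attribute_qty = len(use_matrix[0])
--
--     affinity_matrix = [[0 for _ in range(attribute_qty)] for _ in range(attribute_qty)]
--
--     i = 0
--     while i < attribute_qty:
--         j = 0
--         while j <= i:
--             component = 0
--             for number, query in enumerate(use_matrix):
--                 if query[i] == 1 and query[j] == 1:
--                     component += freq_sum[number]
--
--             affinity_matrix[i][j] = component
--             affinity_matrix[j][i] = component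
--
--             j += 1
--
--         i += 1
--
--     return affinity_matrix
-- ===== SOURCE B (Python) =====
-- def affinity(use_matrix: list[int], freq_sum: list[int]) -> list[list[int]]:
--     n = len(use_matrix[0])
--     matrix = [[0] * n for _ in range(n)]
--     for row, freq in zip(use_matrix, freq_sum):
--         active = [k for k in range(n) if row[k] == 1]
--         for i in active:
--             mi = matrix[i]
--             for j in active:
--                 mi[j] += freq
--     return matrix
-- ===== Notes on version B (the rewrite author's own statement) =====
-- stated objective: faster
-- what changed: Instead of scanning all use_matrix queries once per attribute pair (O(n^2*q)), B makes a single pass over the queries and adds each query's frequency only to the pairs of attributes that query actually uses.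
import Mathlib
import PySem

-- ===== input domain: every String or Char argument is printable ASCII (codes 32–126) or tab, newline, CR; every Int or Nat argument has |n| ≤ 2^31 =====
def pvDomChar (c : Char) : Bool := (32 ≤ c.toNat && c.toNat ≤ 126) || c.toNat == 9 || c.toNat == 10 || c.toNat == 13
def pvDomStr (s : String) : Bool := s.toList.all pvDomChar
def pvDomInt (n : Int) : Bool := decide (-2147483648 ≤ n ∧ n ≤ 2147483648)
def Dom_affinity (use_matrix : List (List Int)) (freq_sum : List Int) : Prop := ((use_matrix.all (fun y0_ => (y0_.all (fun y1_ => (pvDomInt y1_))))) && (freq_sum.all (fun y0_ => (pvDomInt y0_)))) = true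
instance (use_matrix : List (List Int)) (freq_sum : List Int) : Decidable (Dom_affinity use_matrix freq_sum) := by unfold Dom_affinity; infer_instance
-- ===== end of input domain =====

-- B replaces A's O(n^2 * q) scan over all attribute pairs by one pass over the queries,
-- adding each query's frequency only to the pairs of its active attributes (objective: faster).

-- ===== PORT A =====
-- inner 'for number, query in enumerate(use_matrix): …' accumulation of `component`
def affComponent (use_matrix : List (List Int)) (freq_sum : List Int) (i j : Nat) : Int :=
  (PySem.List.enumerate use_matrix 0).foldl
    (fun component p =>
      if PySem.List.pyGetD p.2 (i : Int) 0 == 1 && PySem.List.pyGetD p.2 (j : Int) 0 == 1 then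
        component + PySem.List.pyGetD freq_sum p.1 0
      else component) 0

def affinity (use_matrix : List (List Int)) (freq_sum : List Int) : List (List Int) :=
  let attribute_qty := (use_matrix.headD []).length
  (List.range attribute_qty).foldl
    (fun m i =>
      (List.range (i + 1)).foldl
        (fun m j =>
          let component := affComponent use_matrix freq_sum i j
          (m.modify i (fun row => row.set j component)).modify j (fun row => row.set i component))
        m)
    (List.replicate attribute_qty (List.replicate attribute_qty 0))

-- ===== PORT B =====
def affinity_alt (use_matrix : List (List Int)) (freq_sum : List Int) : List (List Int) :=
  let n := (use_matrix.headD []).length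
  (use_matrix.zip freq_sum).foldl
    (fun matrix rw =>
      let active : List Nat := (List.range n).filter (fun k => PySem.List.pyGetD rw.1 (k : Int) 0 == 1)
      active.foldl
        (fun matrix i =>
          active.foldl (fun matrix j => matrix.modify i (fun mi => mi.modify j (· + rw.2))) matrix)
        matrix)
    (List.replicate n (List.replicate n 0))

-- ===== PRECONDITION & SPEC =====
-- Pre_ excludes exactly the inputs where the Python A raises IndexError: an empty use_matrix,
-- a row shorter than the first row (A indexes every row at every attribute), or an active
-- query whose index falls outside freq_sum.
def Pre_affinity (use_matrix : List (List Int)) (freq_sum : List Int) : Prop :=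
  use_matrix ≠ [] ∧
  (∀ r ∈ use_matrix, (use_matrix.headD []).length ≤ r.length) ∧
  (∀ p ∈ PySem.List.enumerate use_matrix 0,
     ((List.range (use_matrix.headD []).length).any
        (fun k => PySem.List.pyGetD p.2 (k : Int) 0 == 1)) = true → p.1 < (freq_sum.length : Int))
instance (use_matrix : List (List Int)) (freq_sum : List Int) : Decidable (Pre_affinity use_matrix freq_sum) := by unfold Pre_affinity; infer_instance
def pvWitness_affinity : List (List Int) × List Int := ([[1, 0, 1], [0, 1, 0]], [3, 5])
def Spec_affinity (use_matrix : List (List Int)) (freq_sum : List Int) (out : List (List Int)) : Prop := out = affinity_alt use_matrix freq_sum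
instance (use_matrix : List (List Int)) (freq_sum : List Int) (out : List (List Int)) : Decidable (Spec_affinity use_matrix freq_sum out) := by unfold Spec_affinity; infer_instance

-- ===== CLAIM (what is proved, stated in full; the proofs are below) =====
def Claim_equal_affinity : Prop := ∀ (use_matrix : List (List Int)) (freq_sum : List Int), Dom_affinity use_matrix freq_sum → Pre_affinity use_matrix freq_sum → Spec_affinity use_matrix freq_sum (affinity use_matrix freq_sum)

-- ===== LEMMAS AND PROOFS =====

-- matrix entry access and shape
def mget (m : List (List Int)) (a b : Nat) : Int := (m.getD a []).getD b 0

def shaped (m : List (List Int)) (n : Nat) : Prop := m.length = n ∧ ∀ r ∈ m, r.length = n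

-- the common value of entry (i, j): freq-weighted co-usage over the zipped queries
def affS (qs : List (List Int × Int)) (i j : Nat) : Int :=
  (qs.map (fun rw =>
    if PySem.List.pyGetD rw.1 (i : Int) 0 == 1 && PySem.List.pyGetD rw.1 (j : Int) 0 == 1 then rw.2 else 0)).sum

theorem affS_comm (qs : List (List Int × Int)) (i j : Nat) : affS qs i j = affS qs j i := by
  unfold affS
  congr 1
  apply List.map_congr_left
  intro rw _
  rw [Bool.and_comm]

theorem compA_aux (i j : Nat) (f : List Int) :
    ∀ (u : List (List Int)) (s : Nat) (c : Int),
    (PySem.List.enumerate u (s : Int)).foldl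
      (fun component p =>
        if PySem.List.pyGetD p.2 (i : Int) 0 == 1 && PySem.List.pyGetD p.2 (j : Int) 0 == 1 then
          component + PySem.List.pyGetD f p.1 0
        else component) c
    = c + affS (u.zip (f.drop s)) i j := by
  intro u
  induction u with
  | nil => intro s c; simp [PySem.List.enumerate_nil, affS]
  | cons q u ih =>
    intro s c
    rw [PySem.List.enumerate_cons]
    simp only [List.foldl_cons]
    have hcast : ((s : Int) + 1) = ((s + 1 : Nat) : Int) := by push_cast; ring
    by_cases hs : s < f.length
    · have hdrop : f.drop s = f[s] :: f.drop (s + 1) := List.drop_eq_getElem_cons hs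
      rw [hcast, ih (s + 1)]
      rw [hdrop]
      simp only [List.zip_cons_cons, affS, List.map_cons, List.sum_cons]
      have hget : PySem.List.pyGetD f (s : Int) 0 = f[s] := by
        rw [PySem.List.pyGetD_natCast, List.getD_eq_getElem?_getD, List.getElem?_eq_getElem hs]
        rfl
      rw [hget]
      split <;> ring
    · have hdrop : f.drop s = [] := List.drop_eq_nil_of_le (by omega)
      have hdrop' : f.drop (s + 1) = [] := List.drop_eq_nil_of_le (by omega)
      rw [hcast, ih (s + 1), hdrop, hdrop']
      simp only [List.zip_nil_right, affS, List.map_nil, List.sum_nil, add_zero]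
      have hget : PySem.List.pyGetD f (s : Int) 0 = 0 := by
        rw [PySem.List.pyGetD_natCast, List.getD_eq_getElem?_getD,
            List.getElem?_eq_none (by omega)]
        rfl
      rw [hget]
      split <;> ring

theorem affComponent_eq (u : List (List Int)) (f : List Int) (i j : Nat) :
    affComponent u f i j = affS (u.zip f) i j := by
  have := compA_aux i j f u 0 0
  simpa [affComponent] using this

-- generic getD/modify/set pointwise lemmas
theorem getD_modify_gen {α : Type} (l : List α) (i a : Nat) (g : α → α) (d : α) :
    (l.modify i g).getD a d = if i = a ∧ a < l.length then g (l.getD a d) else l.getD a d := by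
  by_cases ha : a < l.length
  · have ha' : a < (l.modify i g).length := by simpa using ha
    rw [List.getD_eq_getElem?_getD, List.getElem?_eq_getElem ha', Option.getD_some,
        List.getElem_modify]
    by_cases hia : i = a <;>
      simp [hia, ha, List.getD_eq_getElem?_getD]
  · have ha' : ¬ a < (l.modify i g).length := by simpa using ha
    rw [List.getD_eq_getElem?_getD, List.getElem?_eq_none (by omega),
        List.getD_eq_getElem?_getD, List.getElem?_eq_none (by omega)]
    simp [ha]

theorem getD_set_row (r : List Int) (j b : Nat) (v : Int) :
    (r.set j v).getD b 0 = if j = b ∧ b < r.length then v else r.getD b 0 := by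
  by_cases hb : b < r.length
  · have hb' : b < (r.set j v).length := by simpa using hb
    rw [List.getD_eq_getElem?_getD, List.getElem?_eq_getElem hb', Option.getD_some,
        List.getElem_set]
    by_cases hjb : j = b <;>
      simp [hjb, hb, List.getD_eq_getElem?_getD]
  · rw [List.getD_eq_getElem?_getD, List.getElem?_eq_none (by simpa using hb),
        List.getD_eq_getElem?_getD, List.getElem?_eq_none (by omega)]
    simp [hb]

theorem getD_row_len (m : List (List Int)) (n a : Nat) (hm : shaped m n) (ha : a < n) :
    (m.getD a []).length = n := by
  obtain ⟨hlen, hrow⟩ := hm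
  have ham : a < m.length := by omega
  rw [List.getD_eq_getElem?_getD, List.getElem?_eq_getElem ham, Option.getD_some]
  exact hrow _ (List.getElem_mem ham)

theorem shaped_write (m : List (List Int)) (n i : Nat) (g : List Int → List Int)
    (hg : ∀ r, (g r).length = r.length) (hm : shaped m n) : shaped (m.modify i g) n := by
  obtain ⟨hlen, hrow⟩ := hm
  refine ⟨by simpa using hlen, ?_⟩
  intro r hr
  obtain ⟨k, hk, rfl⟩ := List.mem_iff_getElem.mp hr
  have hk' : k < m.length := by simpa using hk
  rw [List.getElem_modify]
  split
  · rw [hg]; exact hrow _ (List.getElem_mem hk')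
  · exact hrow _ (List.getElem_mem hk')

-- pointwise description of A's double write matrix[i][j] := c; matrix[j][i] := c
theorem mget_write (m : List (List Int)) (n i j a b : Nat) (v : Int)
    (hm : shaped m n) (ha : a < n) (hb : b < n) :
    mget ((m.modify i (fun row => row.set j v)).modify j (fun row => row.set i v)) a b
    = if (a = i ∧ b = j) ∨ (a = j ∧ b = i) then v else mget m a b := by
  have hra : (m.getD a []).length = n := getD_row_len m n a hm ha
  have ham : a < m.length := hm.1 ▸ ha
  unfold mget
  rw [getD_modify_gen]
  simp only [List.length_modify, ham, and_true]
  by_cases haj : j = a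
  · rw [if_pos haj, getD_modify_gen]
    simp only [ham, and_true]
    by_cases hai : i = a
    · rw [if_pos hai, getD_set_row, getD_set_row]
      simp only [List.length_set, hra]
      split_ifs <;> first | rfl | omega
    · rw [if_neg hai, getD_set_row, hra]
      split_ifs <;> first | rfl | omega
  · rw [if_neg haj, getD_modify_gen]
    simp only [ham, and_true]
    by_cases hai : i = a
    · rw [if_pos hai, getD_set_row, hra]
      split_ifs <;> first | rfl | omega
    · rw [if_neg hai]
      split_ifs <;> first | rfl | omega

theorem shaped_write2 (m : List (List Int)) (n i j : Nat) (v : Int) (hm : shaped m n) :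
    shaped ((m.modify i (fun row => row.set j v)).modify j (fun row => row.set i v)) n :=
  shaped_write _ _ _ _ (by simp) (shaped_write _ _ _ _ (by simp) hm)

-- A's inner while loop (j = 0 … s-1) for a fixed i
theorem innerA (u : List (List Int)) (f : List Int) (n i : Nat) (hi : i < n) :
    ∀ (s : Nat), s ≤ i + 1 → ∀ (m : List (List Int)), shaped m n →
    shaped ((List.range s).foldl
        (fun m j =>
          let component := affComponent u f i j
          (m.modify i (fun row => row.set j component)).modify j (fun row => row.set i component))
        m) n ∧
    ∀ a b, a < n → b < n →
      mget ((List.range s).foldl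
        (fun m j =>
          let component := affComponent u f i j
          (m.modify i (fun row => row.set j component)).modify j (fun row => row.set i component))
        m) a b
      = if (a = i ∧ b < s) ∨ (b = i ∧ a < s) then affS (u.zip f) a b else mget m a b := by
  intro s
  induction s with
  | zero =>
    intro _ m hm
    refine ⟨by simpa using hm, ?_⟩
    intro a b _ _
    simp
  | succ s ih =>
    intro hs m hm
    obtain ⟨ihsh, ihent⟩ := ih (by omega) m hm
    rw [List.range_succ, List.foldl_append, List.foldl_cons, List.foldl_nil]
    refine ⟨shaped_write2 _ _ _ _ _ ihsh, ?_⟩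
    intro a b ha hb
    rw [mget_write _ n _ _ _ _ _ ihsh ha hb, ihent a b ha hb,
        affComponent_eq]
    by_cases h1 : a = i ∧ b = s
    · obtain ⟨rfl, rfl⟩ := h1
      simp
    · by_cases h2 : a = s ∧ b = i
      · rw [if_pos (Or.inr h2), if_pos (Or.inr ⟨h2.2, by omega⟩), h2.1, h2.2, affS_comm]
      · rw [if_neg (by tauto)]
        split_ifs <;> first | rfl | omega

-- A's outer while loop (i = 0 … t-1)
theorem outerA (u : List (List Int)) (f : List Int) (n : Nat) :
    ∀ (t : Nat), t ≤ n → ∀ (m : List (List Int)), shaped m n →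
    shaped ((List.range t).foldl
        (fun m i =>
          (List.range (i + 1)).foldl
            (fun m j =>
              let component := affComponent u f i j
              (m.modify i (fun row => row.set j component)).modify j (fun row => row.set i component))
            m)
        m) n ∧
    ∀ a b, a < n → b < n →
      mget ((List.range t).foldl
        (fun m i =>
          (List.range (i + 1)).foldl
            (fun m j =>
              let component := affComponent u f i j
              (m.modify i (fun row => row.set j component)).modify j (fun row => row.set i component))
            m)
        m) a b
      = if a < t ∧ b < t then affS (u.zip f) a b else mget m a b := by
  intro t
  induction t with
  | zero =>
    intro _ m hm
    refine ⟨by simpa using hm, ?_⟩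
    intro a b _ _
    simp
  | succ t ih =>
    intro ht m hm
    obtain ⟨ihsh, ihent⟩ := ih (by omega) m hm
    rw [List.range_succ, List.foldl_append, List.foldl_cons, List.foldl_nil]
    obtain ⟨insh, inent⟩ := innerA u f n t (by omega) (t + 1) (le_refl _) _ ihsh
    refine ⟨insh, ?_⟩
    intro a b ha hb
    rw [inent a b ha hb]
    by_cases h1 : (a = t ∧ b < t + 1) ∨ (b = t ∧ a < t + 1)
    · rw [if_pos h1, if_pos (by omega)]
    · rw [if_neg h1, ihent a b ha hb]
      split_ifs <;> first | rfl | omega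

theorem shaped_replicate (n : Nat) : shaped (List.replicate n (List.replicate n (0 : Int))) n := by
  refine ⟨by simp, ?_⟩
  intro r hr
  rw [List.eq_of_mem_replicate hr]
  simp

theorem mget_replicate (n a b : Nat) :
    mget (List.replicate n (List.replicate n (0 : Int))) a b = 0 := by
  unfold mget
  have h1 : (List.replicate n (List.replicate n (0 : Int))).getD a []
      = if a < n then List.replicate n (0 : Int) else [] := by
    rw [List.getD_eq_getElem?_getD, List.getElem?_replicate]
    split <;> rfl
  rw [h1]
  split
  · rw [List.getD_eq_getElem?_getD, List.getElem?_replicate]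
    split <;> rfl
  · rfl

theorem affinity_entries (u : List (List Int)) (f : List Int) :
    shaped (affinity u f) ((u.headD []).length) ∧
    ∀ a b, a < (u.headD []).length → b < (u.headD []).length →
      mget (affinity u f) a b = affS (u.zip f) a b := by
  obtain ⟨hsh, hent⟩ := outerA u f ((u.headD []).length) ((u.headD []).length) (le_refl _)
    (List.replicate ((u.headD []).length) (List.replicate ((u.headD []).length) 0))
    (shaped_replicate _)
  refine ⟨hsh, ?_⟩
  intro a b ha hb
  rw [show affinity u f = (List.range ((u.headD []).length)).foldl _ _ from rfl, hent a b ha hb,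
      if_pos ⟨ha, hb⟩]

-- B's innermost loop: add w at (i, j) for every j in L
theorem mget_add (m : List (List Int)) (n i j a b : Nat) (w : Int)
    (hm : shaped m n) (ha : a < n) (hb : b < n) :
    mget (m.modify i (fun mi => mi.modify j (· + w))) a b
    = if a = i ∧ b = j then mget m a b + w else mget m a b := by
  have hra : (m.getD a []).length = n := getD_row_len m n a hm ha
  have ham : a < m.length := hm.1 ▸ ha
  unfold mget
  rw [getD_modify_gen]
  simp only [ham, and_true]
  by_cases hai : i = a
  · rw [if_pos hai, getD_modify_gen, hra]
    split_ifs <;> first | rfl | omega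
  · rw [if_neg hai]
    split_ifs <;> first | rfl | omega

theorem innerB (n i : Nat) (w : Int) :
    ∀ (L : List Nat), L.Nodup → (∀ x ∈ L, x < n) → ∀ (m : List (List Int)), shaped m n →
    shaped (L.foldl (fun m j => m.modify i (fun mi => mi.modify j (· + w))) m) n ∧
    ∀ a b, a < n → b < n →
      mget (L.foldl (fun m j => m.modify i (fun mi => mi.modify j (· + w))) m) a b
      = if a = i ∧ b ∈ L then mget m a b + w else mget m a b := by
  intro L
  induction L with
  | nil =>
    intro _ _ m hm
    exact ⟨hm, fun a b _ _ => by simp⟩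
  | cons j L ih =>
    intro hnd hlt m hm
    have hm' : shaped (m.modify i (fun mi => mi.modify j (· + w))) n :=
      shaped_write _ _ _ _ (by simp) hm
    obtain ⟨ihsh, ihent⟩ := ih hnd.of_cons (fun x hx => hlt x (List.mem_cons_of_mem _ hx)) _ hm'
    rw [List.foldl_cons]
    refine ⟨ihsh, ?_⟩
    intro a b ha hb
    rw [ihent a b ha hb, mget_add _ n _ _ _ _ _ hm ha hb]
    have hjL : j ∉ L := (List.nodup_cons.mp hnd).1
    by_cases h1 : a = i ∧ b ∈ L
    · have hbj : ¬ (a = i ∧ b = j) := fun hc => hjL (hc.2 ▸ h1.2)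
      rw [if_pos h1, if_neg hbj, if_pos ⟨h1.1, List.mem_cons_of_mem _ h1.2⟩]
    · rw [if_neg h1]
      by_cases h2 : a = i ∧ b = j
      · rw [if_pos h2, if_pos ⟨h2.1, h2.2 ▸ List.mem_cons_self⟩]
      · rw [if_neg h2, if_neg (by simp [List.mem_cons]; tauto)]

theorem outerB (n : Nat) (w : Int) (A : List Nat)
    (hA : A.Nodup) (hAlt : ∀ x ∈ A, x < n) :
    ∀ (L : List Nat), L.Nodup → (∀ x ∈ L, x < n) → ∀ (m : List (List Int)), shaped m n →
    shaped (L.foldl (fun m i => A.foldl (fun m j => m.modify i (fun mi => mi.modify j (· + w))) m) m) n ∧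
    ∀ a b, a < n → b < n →
      mget (L.foldl (fun m i => A.foldl (fun m j => m.modify i (fun mi => mi.modify j (· + w))) m) m) a b
      = if a ∈ L ∧ b ∈ A then mget m a b + w else mget m a b := by
  intro L
  induction L with
  | nil =>
    intro _ _ m hm
    exact ⟨hm, fun a b _ _ => by simp⟩
  | cons i L ih =>
    intro hnd hlt m hm
    obtain ⟨insh, inent⟩ := innerB n i w A hA hAlt m hm
    obtain ⟨ihsh, ihent⟩ := ih hnd.of_cons (fun x hx => hlt x (List.mem_cons_of_mem _ hx)) _ insh
    rw [List.foldl_cons]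
    refine ⟨ihsh, ?_⟩
    intro a b ha hb
    rw [ihent a b ha hb, inent a b ha hb]
    have hiL : i ∉ L := (List.nodup_cons.mp hnd).1
    by_cases h1 : a ∈ L ∧ b ∈ A
    · have hai : ¬ (a = i ∧ b ∈ A) := fun hc => hiL (hc.1 ▸ h1.1)
      rw [if_pos h1, if_neg hai, if_pos ⟨List.mem_cons_of_mem _ h1.1, h1.2⟩]
    · rw [if_neg h1]
      by_cases h2 : a = i ∧ b ∈ A
      · rw [if_pos h2, if_pos ⟨h2.1 ▸ List.mem_cons_self, h2.2⟩]
      · rw [if_neg h2, if_neg (by simp [List.mem_cons]; tauto)]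

theorem foldB (n : Nat) :
    ∀ (qs : List (List Int × Int)) (m : List (List Int)), shaped m n →
    shaped (qs.foldl
      (fun matrix rw =>
        let active : List Nat := (List.range n).filter (fun k => PySem.List.pyGetD rw.1 (k : Int) 0 == 1)
        active.foldl
          (fun matrix i =>
            active.foldl (fun matrix j => matrix.modify i (fun mi => mi.modify j (· + rw.2))) matrix)
          matrix)
      m) n ∧
    ∀ a b, a < n → b < n →
      mget (qs.foldl
        (fun matrix rw =>
          let active : List Nat := (List.range n).filter (fun k => PySem.List.pyGetD rw.1 (k : Int) 0 == 1)
          active.foldl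
            (fun matrix i =>
              active.foldl (fun matrix j => matrix.modify i (fun mi => mi.modify j (· + rw.2))) matrix)
            matrix)
        m) a b
      = mget m a b + affS qs a b := by
  intro qs
  induction qs with
  | nil =>
    intro m hm
    refine ⟨hm, ?_⟩
    intro a b _ _
    simp [affS]
  | cons rw qs ih =>
    intro m hm
    have hAnd : ((List.range n).filter (fun k : Nat => PySem.List.pyGetD rw.1 (k : Int) 0 == 1)).Nodup :=
      (List.nodup_range).filter _
    have hAlt : ∀ x ∈ (List.range n).filter (fun k : Nat => PySem.List.pyGetD rw.1 (k : Int) 0 == 1), x < n := by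
      intro x hx
      exact List.mem_range.mp (List.mem_of_mem_filter hx)
    obtain ⟨stsh, stent⟩ := outerB n rw.2 _ hAnd hAlt _ hAnd hAlt m hm
    obtain ⟨ihsh, ihent⟩ := ih _ stsh
    rw [List.foldl_cons]
    refine ⟨ihsh, ?_⟩
    intro a b ha hb
    rw [ihent a b ha hb, stent a b ha hb]
    have hmem : ∀ c : Nat, c < n →
        (c ∈ (List.range n).filter (fun k : Nat => PySem.List.pyGetD rw.1 (k : Int) 0 == 1)
          ↔ (PySem.List.pyGetD rw.1 (c : Int) 0 == 1) = true) := by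
      intro c hc
      simp [List.mem_filter, List.mem_range, hc]
    simp only [affS, List.map_cons, List.sum_cons]
    by_cases hcond : (PySem.List.pyGetD rw.1 (a : Int) 0 == 1 && PySem.List.pyGetD rw.1 (b : Int) 0 == 1) = true
    · rw [if_pos hcond]
      have := (hmem a ha).mpr (by exact (Bool.and_eq_true _ _).mp hcond |>.1)
      have := (hmem b hb).mpr (by exact (Bool.and_eq_true _ _).mp hcond |>.2)
      rw [if_pos ⟨by assumption, by assumption⟩]
      ring
    · rw [if_neg hcond]
      have : ¬ (a ∈ (List.range n).filter (fun k : Nat => PySem.List.pyGetD rw.1 (k : Int) 0 == 1)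
          ∧ b ∈ (List.range n).filter (fun k : Nat => PySem.List.pyGetD rw.1 (k : Int) 0 == 1)) := by
        intro ⟨hma, hmb⟩
        exact hcond ((Bool.and_eq_true _ _).mpr ⟨(hmem a ha).mp hma, (hmem b hb).mp hmb⟩)
      rw [if_neg this]
      ring

theorem affinity_alt_entries (u : List (List Int)) (f : List Int) :
    shaped (affinity_alt u f) ((u.headD []).length) ∧
    ∀ a b, a < (u.headD []).length → b < (u.headD []).length →
      mget (affinity_alt u f) a b = affS (u.zip f) a b := by
  obtain ⟨hsh, hent⟩ := foldB ((u.headD []).length) (u.zip f)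
    (List.replicate ((u.headD []).length) (List.replicate ((u.headD []).length) 0))
    (shaped_replicate _)
  refine ⟨hsh, ?_⟩
  intro a b ha hb
  rw [show affinity_alt u f = (u.zip f).foldl _ _ from rfl, hent a b ha hb, mget_replicate]
  ring

theorem eq_of_mget (m1 m2 : List (List Int)) (n : Nat)
    (h1 : shaped m1 n) (h2 : shaped m2 n)
    (h : ∀ a b, a < n → b < n → mget m1 a b = mget m2 a b) : m1 = m2 := by
  obtain ⟨l1, r1⟩ := h1
  obtain ⟨l2, r2⟩ := h2
  apply List.ext_getElem (by omega)
  intro a ha1 ha2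
  have han : a < n := by omega
  apply List.ext_getElem
  · rw [r1 _ (List.getElem_mem ha1), r2 _ (List.getElem_mem ha2)]
  · intro b hb1 hb2
    have hbn : b < n := by rw [r1 _ (List.getElem_mem ha1)] at hb1; omega
    have := h a b han hbn
    unfold mget at this
    simp only [List.getD_eq_getElem?_getD, List.getElem?_eq_getElem ha1,
               List.getElem?_eq_getElem ha2, Option.getD_some] at this
    simpa [List.getD_eq_getElem?_getD, List.getElem?_eq_getElem hb1,
           List.getElem?_eq_getElem hb2] using this

-- ===== VERDICT (by name: the statement is the Claim_ definition above) =====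
theorem affinity_spec : Claim_equal_affinity := by
  intro u f _ _
  unfold Spec_affinity
  obtain ⟨hshA, hentA⟩ := affinity_entries u f
  obtain ⟨hshB, hentB⟩ := affinity_alt_entries u f
  exact eq_of_mget _ _ _ hshA hshB (fun a b ha hb => by rw [hentA a b ha hb, hentB a b ha hb])
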